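-- pv_equiv track=rewrite | github.com/VonPoo/BioMatch | scripts/ref_map_new.py | find_primary_sequences
-- ===== SOURCE A (Python) =====
-- from collections import defaultdict
--
-- def find_primary_sequences(mapping, seq_lengths):
--     chrom_to_seqs = defaultdict(list)
--     for seq_id, chrom in mapping.items():
--         if seq_id in seq_lengths:
--             chrom_to_seqs[chrom].append((seq_id, seq_lengths[seq_id]))
--     primary_seqs = {}
--     for chrom, seqs in chrom_to_seqs.items():
--         seqs.sort(key=lambda x: x[1], reverse=True)
--         primary_seqs[chrom] = seqs[0][0]
--     return primary_seqs
-- ===== SOURCE B (Python) =====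
-- def find_primary_sequences(mapping, seq_lengths):
--     best = {}
--     for seq_id, chrom in mapping.items():
--         if seq_id not in seq_lengths:
--             continue
--         length = seq_lengths[seq_id]
--         cur = best.get(chrom)
--         if cur is None or length > cur[1]:
--             best[chrom] = (seq_id, length)
--     return {chrom: pair[0] for chrom, pair in best.items()}
-- ===== Notes on version B (the rewrite author's own statement) =====
-- stated objective: simpler
-- what changed: Replaces build-per-chromosome-lists-then-stable-reverse-sort-each-group with a single streaming pass keeping one running best (seq_id, length) per chromosome, updating only on strictly greater length.
import Mathlib
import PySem

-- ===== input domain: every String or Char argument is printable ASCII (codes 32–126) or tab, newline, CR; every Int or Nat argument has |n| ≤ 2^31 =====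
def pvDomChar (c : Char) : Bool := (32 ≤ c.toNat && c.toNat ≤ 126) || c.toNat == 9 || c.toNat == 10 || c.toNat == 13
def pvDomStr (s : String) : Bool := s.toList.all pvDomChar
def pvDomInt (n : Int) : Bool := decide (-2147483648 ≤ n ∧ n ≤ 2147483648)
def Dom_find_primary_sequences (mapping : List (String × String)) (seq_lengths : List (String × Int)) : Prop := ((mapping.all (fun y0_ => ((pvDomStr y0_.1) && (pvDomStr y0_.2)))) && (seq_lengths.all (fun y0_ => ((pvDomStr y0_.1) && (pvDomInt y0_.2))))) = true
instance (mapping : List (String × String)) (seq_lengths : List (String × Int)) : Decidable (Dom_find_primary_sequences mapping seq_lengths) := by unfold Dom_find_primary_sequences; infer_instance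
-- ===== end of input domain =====

-- B replaces group-then-stable-reverse-sort with a one-pass running maximum per chromosome (simpler).

-- ===== PORT A =====
-- chrom_to_seqs[chrom].append((seq_id, seq_lengths[seq_id])) for each mapped seq present in seq_lengths,
-- then primary_seqs[chrom] = sorted-descending-by-length seqs, first element's id.
-- (seqs is nonempty by construction, so 'seqs[0]' is ported as headD with an unreachable default.)
def find_primary_sequences (mapping : List (String × String)) (seq_lengths : List (String × Int)) : List (String × String) :=
  let chrom_to_seqs : PySem.Dict String (List (String × Int)) :=
    mapping.foldl (fun d p =>
      match (PySem.Dict.mk seq_lengths).get? p.1 with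
      | some len => d.modify p.2 [] (fun l => l ++ [(p.1, len)])
      | none => d) PySem.Dict.empty
  let primary_seqs : PySem.Dict String String :=
    chrom_to_seqs.items.foldl (fun d p =>
      let seqs := PySem.List.sorted p.2 (fun x => x.2) true
      d.insert p.1 (seqs.headD ("", 0)).1) PySem.Dict.empty
  primary_seqs.items

-- ===== PORT B =====
-- one pass: best[chrom] = running (seq_id, length), replaced only on strictly greater length
def find_primary_sequences_alt (mapping : List (String × String)) (seq_lengths : List (String × Int)) : List (String × String) :=
  let best : PySem.Dict String (String × Int) :=
    mapping.foldl (fun d p =>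
      match (PySem.Dict.mk seq_lengths).get? p.1 with
      | none => d
      | some len =>
        match d.get? p.2 with
        | none => d.insert p.2 (p.1, len)
        | some cur => if len > cur.2 then d.insert p.2 (p.1, len) else d) PySem.Dict.empty
  best.items.map (fun p => (p.1, p.2.1))

-- ===== PRECONDITION & SPEC =====
def Spec_find_primary_sequences (mapping : List (String × String)) (seq_lengths : List (String × Int)) (out : List (String × String)) : Prop := out = find_primary_sequences_alt mapping seq_lengths
instance (mapping : List (String × String)) (seq_lengths : List (String × Int)) (out : List (String × String)) : Decidable (Spec_find_primary_sequences mapping seq_lengths out) := by unfold Spec_find_primary_sequences; infer_instance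

-- ===== CLAIM (what is proved, stated in full; the proofs are below) =====
def Claim_equal_find_primary_sequences : Prop := ∀ (mapping : List (String × String)) (seq_lengths : List (String × Int)), Dom_find_primary_sequences mapping seq_lengths → Spec_find_primary_sequences mapping seq_lengths (find_primary_sequences mapping seq_lengths)

-- ===== LEMMAS AND PROOFS =====

-- ghost: the running-maximum value of a nonempty list (first element attaining the max)
def pvBest1 : List (String × Int) → (String × Int)
  | [] => ("", 0)
  | x :: xs => xs.foldl (fun b y => if y.2 > b.2 then y else b) x

def pvStepA (d : PySem.Dict String (List (String × Int))) (q : String × (String × Int)) : PySem.Dict String (List (String × Int)) :=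
  d.modify q.1 [] (fun l => l ++ [q.2])

def pvStepB (d : PySem.Dict String (String × Int)) (q : String × (String × Int)) : PySem.Dict String (String × Int) :=
  match d.get? q.1 with
  | none => d.insert q.1 q.2
  | some cur => if q.2.2 > cur.2 then d.insert q.1 q.2 else d

def pvEnts (mapping : List (String × String)) (seq_lengths : List (String × Int)) : List (String × (String × Int)) :=
  mapping.filterMap (fun p => ((PySem.Dict.mk seq_lengths).get? p.1).map (fun len => (p.2, (p.1, len))))

theorem pvFoldA_eq (mapping : List (String × String)) (seq_lengths : List (String × Int))
    (d : PySem.Dict String (List (String × Int))) :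
    mapping.foldl (fun d p =>
      match (PySem.Dict.mk seq_lengths).get? p.1 with
      | some len => d.modify p.2 [] (fun l => l ++ [(p.1, len)])
      | none => d) d = (pvEnts mapping seq_lengths).foldl pvStepA d := by
  induction mapping generalizing d with
  | nil => rfl
  | cons p rest ih =>
    simp only [List.foldl_cons, pvEnts, List.filterMap_cons]
    cases h : (PySem.Dict.mk seq_lengths).get? p.1 with
    | none => simpa [h, pvEnts] using ih _
    | some len => simpa [h, pvEnts, pvStepA] using ih _

theorem pvFoldB_eq (mapping : List (String × String)) (seq_lengths : List (String × Int))
    (d : PySem.Dict String (String × Int)) :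
    mapping.foldl (fun d p =>
      match (PySem.Dict.mk seq_lengths).get? p.1 with
      | none => d
      | some len =>
        match d.get? p.2 with
        | none => d.insert p.2 (p.1, len)
        | some cur => if len > cur.2 then d.insert p.2 (p.1, len) else d) d
      = (pvEnts mapping seq_lengths).foldl pvStepB d := by
  induction mapping generalizing d with
  | nil => rfl
  | cons p rest ih =>
    simp only [List.foldl_cons, pvEnts, List.filterMap_cons]
    cases h : (PySem.Dict.mk seq_lengths).get? p.1 with
    | none => simpa [h, pvEnts] using ih _
    | some len => simpa [h, pvEnts, pvStepB] using ih _

theorem pvBest1_append (l : List (String × Int)) (y : String × Int) (h : l ≠ []) :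
    pvBest1 (l ++ [y]) = if y.2 > (pvBest1 l).2 then y else pvBest1 l := by
  cases l with
  | nil => exact absurd rfl h
  | cons x t => simp [pvBest1, List.foldl_append]

theorem pvKeysEq (dA : PySem.Dict String (List (String × Int))) (dB : PySem.Dict String (String × Int))
    (hrel : dB.items = dA.items.map (fun p => (p.1, pvBest1 p.2))) :
    dB.keys = dA.keys := by
  simp only [PySem.Dict.keys, hrel, List.map_map]
  rfl

theorem pvGetMap (dA : PySem.Dict String (List (String × Int))) (dB : PySem.Dict String (String × Int))
    (hnd : dA.keys.Nodup)
    (hrel : dB.items = dA.items.map (fun p => (p.1, pvBest1 p.2))) (k : String) :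
    dB.get? k = (dA.get? k).map pvBest1 := by
  have hkeys := pvKeysEq dA dB hrel
  cases h : dA.get? k with
  | none =>
    have hk : k ∉ dA.keys := (PySem.Dict.get?_eq_none_iff_not_mem_keys dA k).mp h
    simp only [Option.map_none]
    exact (PySem.Dict.get?_eq_none_iff_not_mem_keys dB k).mpr (hkeys ▸ hk)
  | some l =>
    have hm : (k, l) ∈ dA.items := PySem.Dict.mem_items_of_get?_eq_some dA h
    have hm' : (k, pvBest1 l) ∈ dB.items := by
      rw [hrel]; exact List.mem_map_of_mem hm
    exact PySem.Dict.get?_of_mem_items dB hm' (hkeys ▸ hnd)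

theorem pvMainInv (ents : List (String × (String × Int)))
    (dA : PySem.Dict String (List (String × Int))) (dB : PySem.Dict String (String × Int))
    (hnd : dA.keys.Nodup)
    (hrel : dB.items = dA.items.map (fun p => (p.1, pvBest1 p.2)))
    (hne : ∀ p ∈ dA.items, p.2 ≠ []) :
    (ents.foldl pvStepB dB).items = ((ents.foldl pvStepA dA).items).map (fun p => (p.1, pvBest1 p.2))
    ∧ (ents.foldl pvStepA dA).keys.Nodup
    ∧ ∀ p ∈ (ents.foldl pvStepA dA).items, p.2 ≠ [] := by
  induction ents generalizing dA dB with
  | nil => exact ⟨hrel, hnd, hne⟩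
  | cons q rest ih =>
    simp only [List.foldl_cons]
    have hgetB := pvGetMap dA dB hnd hrel
    cases hA : dA.get? q.1 with
    | none =>
      -- fresh chromosome: A appends (q.1, [q.2]); B appends (q.1, q.2)
      have hcA : dA.contains q.1 = false := by
        rw [PySem.Dict.contains_eq_isSome_get?, hA]; rfl
      have hcB : dB.contains q.1 = false := by
        rw [PySem.Dict.contains_eq_isSome_get?, hgetB q.1, hA]; rfl
      have hAstep : pvStepA dA q = dA.insert q.1 [q.2] := by
        show dA.insert q.1 (dA.getD q.1 [] ++ [q.2]) = _
        rw [PySem.Dict.getD_of_not_contains dA [] hcA]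
        rfl
      have hBstep : pvStepB dB q = dB.insert q.1 q.2 := by
        unfold pvStepB
        rw [hgetB q.1, hA]
        rfl
      rw [hAstep, hBstep]
      refine ih _ _ ?_ ?_ ?_
      · rw [PySem.Dict.keys_insert_of_not_contains dA _ hcA]
        have hqk : q.1 ∉ dA.keys := fun hm => by
          rw [(PySem.Dict.contains_iff_mem_keys dA q.1).mpr hm] at hcA
          cases hcA
        simp only [List.nodup_append, List.nodup_cons, List.not_mem_nil, not_false_iff, List.nodup_nil, true_and]
        refine ⟨hnd, ?_⟩
        intro a ha b hb heq
        have hb1 : b = q.1 := by simpa using hb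
        exact hqk (hb1 ▸ heq ▸ ha)
      · rw [PySem.Dict.items_insert_of_not_contains dA _ hcA,
            PySem.Dict.items_insert_of_not_contains dB _ hcB, hrel]
        simp [pvBest1]
      · intro p hp
        rw [PySem.Dict.items_insert_of_not_contains dA _ hcA] at hp
        rcases List.mem_append.mp hp with h1 | h2
        · exact hne p h1
        · simp only [List.mem_singleton] at h2
          subst h2
          simp
    | some l =>
      have hlm : (q.1, l) ∈ dA.items := PySem.Dict.mem_items_of_get?_eq_some dA hA
      have hlne : l ≠ [] := hne _ hlm
      have hcA : dA.contains q.1 = true := by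
        rw [PySem.Dict.contains_eq_isSome_get?, hA]; rfl
      have hcB : dB.contains q.1 = true := by
        rw [PySem.Dict.contains_eq_isSome_get?, hgetB q.1, hA]; rfl
      have hAstep : pvStepA dA q = dA.insert q.1 (l ++ [q.2]) := by
        show dA.insert q.1 (dA.getD q.1 [] ++ [q.2]) = _
        rw [PySem.Dict.getD_of_get?_eq_some dA [] hA]
      have hAitems : (dA.insert q.1 (l ++ [q.2])).items
          = dA.items.map (fun p => if p.1 == q.1 then (q.1, l ++ [q.2]) else p) :=
        PySem.Dict.items_insert_of_contains dA _ hcA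
      have hb := pvBest1_append l q.2 hlne
      -- the new relation target, as a map over dA.items
      have htarget : ((dA.insert q.1 (l ++ [q.2])).items).map (fun p => (p.1, pvBest1 p.2))
          = dA.items.map (fun p => if p.1 == q.1 then (q.1, pvBest1 (l ++ [q.2])) else (p.1, pvBest1 p.2)) := by
        rw [hAitems, List.map_map]
        refine List.map_congr_left (fun p _ => ?_)
        by_cases hpq : p.1 = q.1 <;> simp [hpq]
      have hBitems : (pvStepB dB q).items
          = dA.items.map (fun p => if p.1 == q.1 then (q.1, pvBest1 (l ++ [q.2])) else (p.1, pvBest1 p.2)) := by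
        unfold pvStepB
        rw [hgetB q.1, hA]
        simp only [Option.map_some]
        by_cases hgt : q.2.2 > (pvBest1 l).2
        · rw [if_pos hgt, PySem.Dict.items_insert_of_contains dB _ hcB, hrel, List.map_map]
          refine List.map_congr_left (fun p _ => ?_)
          by_cases hpq : p.1 = q.1 <;> simp [hpq, hb, hgt]
        · rw [if_neg hgt, hrel]
          refine List.map_congr_left (fun p hp => ?_)
          by_cases hpq : p.1 = q.1
          · have hpeq : p = (q.1, l) := by
              have hinj := List.inj_on_of_nodup_map (f := Prod.fst) (l := dA.items) hnd
              exact hinj hp hlm hpq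
            subst hpeq
            simp [hb, hgt]
          · simp [hpq]
      rw [hAstep]
      refine ih _ _ ?_ ?_ ?_
      · rw [PySem.Dict.keys_insert_of_contains dA _ hcA]
        exact hnd
      · rw [hBitems, htarget]
      · intro p hp
        rw [hAitems] at hp
        obtain ⟨p0, hp0, hp0e⟩ := List.mem_map.mp hp
        by_cases hpq : p0.1 = q.1
        · simp only [hpq, beq_self_eq_true, if_true] at hp0e
          subst hp0e
          simp
        · rw [if_neg (by simpa using hpq)] at hp0e
          subst hp0e
          exact hne p0 hp0

theorem pvHeadSorted (l : List (String × Int)) (h : l ≠ []) :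
    (PySem.List.sorted l (fun x => x.2) true).headD ("", 0) = pvBest1 l := by
  induction l using List.reverseRecOn with
  | nil => exact absurd rfl h
  | append_singleton xs y ih =>
    rw [PySem.List.sorted_rev_eq_foldl_insertBy, List.foldl_append, ← PySem.List.sorted_rev_eq_foldl_insertBy]
    simp only [List.foldl_cons, List.foldl_nil]
    cases xs with
    | nil =>
      rw [PySem.List.sorted_rev_eq_foldl_insertBy]
      simp [PySem.List.insertBy, pvBest1]
    | cons x t =>
      have hne : PySem.List.sorted (x :: t) (fun x => x.2) true ≠ [] := by
        simp [PySem.List.sorted_eq_nil_iff]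
      obtain ⟨hd, tl, hs⟩ := List.exists_cons_of_ne_nil hne
      have ihd : hd = pvBest1 (x :: t) := by
        have h2 := ih (by simp)
        rw [hs] at h2
        simpa using h2
      rw [hs, pvBest1_append _ _ (by simp), ← ihd]
      by_cases hc : hd.2 < y.2
      · simp [PySem.List.insertBy, hc]
      · simp [PySem.List.insertBy, hc]

-- ===== VERDICT (by name: the statement is the Claim_ definition above) =====
theorem find_primary_sequences_spec : Claim_equal_find_primary_sequences := by
  intro mapping seq_lengths _
  show find_primary_sequences mapping seq_lengths = find_primary_sequences_alt mapping seq_lengths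
  simp only [find_primary_sequences, find_primary_sequences_alt]
  rw [pvFoldA_eq, pvFoldB_eq]
  obtain ⟨hrel, hnd, hne⟩ := pvMainInv (pvEnts mapping seq_lengths) PySem.Dict.empty PySem.Dict.empty
    List.nodup_nil rfl (fun p hp => absurd hp (List.not_mem_nil))
  have hfresh : ∀ a ∈ ((pvEnts mapping seq_lengths).foldl pvStepA PySem.Dict.empty).items,
      (PySem.Dict.empty : PySem.Dict String String).contains a.1 = false := by
    intro a _
    simp
  have hknd : (((pvEnts mapping seq_lengths).foldl pvStepA PySem.Dict.empty).items.map
      (fun p => p.1)).Nodup := by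
    simpa [PySem.Dict.keys] using hnd
  rw [PySem.Dict.items_foldl_insert_fresh _ _ _ _ hfresh hknd, hrel, List.map_map]
  have hempty : (PySem.Dict.empty : PySem.Dict String String).items = [] := rfl
  rw [hempty, List.nil_append]
  refine List.map_congr_left (fun p hp => ?_)
  simp only [Function.comp]
  rw [pvHeadSorted p.2 (hne p hp)]
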